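-- pv_equiv track=rewrite | github.com/sofyc/Run_dygiepp_on_MUC | data/MUC_processed/process_muc.py | findIndiceForMention
-- ===== SOURCE A (Python) =====
-- def findIndiceForMention(document, mention):
--     for i in range(len(document)- len(mention) + 1):
--         for j in range(len(mention)):
--             if mention[j] != document[i+j]:
--                 break
--
--         if (mention[-1] == document[i+len(mention)-1]) and (j+1 == len(mention)):
--             return True, i
--     return False, -1
-- ===== SOURCE B (Python) =====
-- def findIndiceForMention(document, mention):
--     n, m = len(document), len(mention)
--     res = (False, -1)
--     for i in range(n - m, -1, -1):
--         if document[i:i+m] == mention: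
--             res = (True, i)
--     return res
-- ===== Notes on version B (the rewrite author's own statement) =====
-- stated objective: alternative
-- what changed: B sweeps candidate start positions backwards comparing whole slices and keeping the last (= leftmost) match in an accumulator, instead of A's forward loop with an inner element-by-element loop, break, post-check of the leftover loop variable j and early return.
import Mathlib
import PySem

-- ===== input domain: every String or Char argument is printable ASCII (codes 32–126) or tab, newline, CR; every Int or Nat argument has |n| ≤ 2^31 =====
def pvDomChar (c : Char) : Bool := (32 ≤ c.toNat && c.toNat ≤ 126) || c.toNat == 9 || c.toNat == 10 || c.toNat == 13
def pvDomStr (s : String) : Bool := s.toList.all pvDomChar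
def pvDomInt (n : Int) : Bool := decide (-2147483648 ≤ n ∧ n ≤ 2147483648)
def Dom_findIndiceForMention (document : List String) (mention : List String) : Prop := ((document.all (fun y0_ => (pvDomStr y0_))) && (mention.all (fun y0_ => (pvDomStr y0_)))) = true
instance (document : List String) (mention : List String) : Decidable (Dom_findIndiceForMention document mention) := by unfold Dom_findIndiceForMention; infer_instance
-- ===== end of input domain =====

-- B changes the algorithmic shape only (backward slice-comparison sweep vs forward index loops
-- with break/early return); same return value wherever A returns (mention ≠ []).

-- ===== PORT A =====
-- inner loop: 'for j in range(k, len(mention)): if mention[j] != document[i+j]: break'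
-- returning the final value of j (j0 = value if the loop body never runs; unreachable under Pre_).
def pvAInner (document mention : List String) (i : Int) : List Int → Int → Int
  | [], j => j
  | x :: rest, _ =>
    if PySem.List.pyGetD mention x "" ≠ PySem.List.pyGetD document (i + x) "" then x
    else pvAInner document mention i rest x

def pvAOuter (document mention : List String) : List Int → Bool × Int
  | [] => (false, -1)
  | i :: rest =>
    let j := pvAInner document mention i (PySem.List.pyRange 0 (mention.length : Int) 1) (-1)
    if PySem.List.pyGetD mention (-1) "" = PySem.List.pyGetD document (i + (mention.length : Int) - 1) ""
        ∧ j + 1 = (mention.length : Int) then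
      (true, i)
    else pvAOuter document mention rest

def findIndiceForMention (document : List String) (mention : List String) : Bool × Int :=
  pvAOuter document mention
    (PySem.List.pyRange 0 ((document.length : Int) - (mention.length : Int) + 1) 1)

-- ===== PORT B =====
def findIndiceForMention_alt (document : List String) (mention : List String) : Bool × Int :=
  let n : Int := document.length
  let m : Int := mention.length
  (PySem.List.pyRange (n - m) (-1) (-1)).foldl
    (fun res i =>
      if PySem.List.slice document (some i) (some (i + m)) = mention then (true, i) else res)
    (false, -1)

-- ===== PRECONDITION & SPEC =====
-- A raises IndexError on mention = [] ('mention[-1]'); that is the only input it raises on.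
def Pre_findIndiceForMention (document : List String) (mention : List String) : Prop :=
  mention ≠ []
instance (document : List String) (mention : List String) : Decidable (Pre_findIndiceForMention document mention) := by unfold Pre_findIndiceForMention; infer_instance

def pvWitness_findIndiceForMention : List String × List String := (["a", "b", "c"], ["b", "c"])

def Spec_findIndiceForMention (document : List String) (mention : List String) (out : Bool × Int) : Prop := out = findIndiceForMention_alt document mention
instance (document : List String) (mention : List String) (out : Bool × Int) : Decidable (Spec_findIndiceForMention document mention out) := by unfold Spec_findIndiceForMention; infer_instance

-- ===== CLAIM (what is proved, stated in full; the proofs are below) =====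
def Claim_equal_findIndiceForMention : Prop := ∀ (document : List String) (mention : List String), Dom_findIndiceForMention document mention → Pre_findIndiceForMention document mention → Spec_findIndiceForMention document mention (findIndiceForMention document mention)

-- ===== LEMMAS AND PROOFS =====

-- Characterisation of A's inner loop on the tail range [k, m): if every position from k on
-- matches, the final j is m-1; if t is the least mismatching position ≥ k, the final j is t.
lemma pvAInner_spec (document mention : List String) (a : Nat) :
    ∀ (d k : Nat) (j0 : Int), mention.length - k = d + 1 → k < mention.length →
      ((∀ t, k ≤ t → t < mention.length → mention.getD t "" = document.getD (a + t) "") →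
        pvAInner document mention (a : Int)
          (PySem.List.pyRange (k : Int) (mention.length : Int) 1) j0 = (mention.length : Int) - 1)
      ∧ (∀ t : Nat, k ≤ t → t < mention.length →
          (∀ s, k ≤ s → s < t → mention.getD s "" = document.getD (a + s) "") →
          mention.getD t "" ≠ document.getD (a + t) "" →
          pvAInner document mention (a : Int)
            (PySem.List.pyRange (k : Int) (mention.length : Int) 1) j0 = (t : Int)) := by
  intro d
  induction d with
  | zero =>
    intro k j0 hd hk
    have hk1 : mention.length = k + 1 := by omega
    rw [PySem.List.pyRange_one_cons (by exact_mod_cast hk)]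
    have hnil : PySem.List.pyRange ((k : Int) + 1) (mention.length : Int) 1 = [] := by
      apply PySem.List.pyRange_one_eq_nil; omega
    rw [hnil]
    have hidx : (a : Int) + (k : Int) = ((a + k : Nat) : Int) := by push_cast; ring
    constructor
    · intro hall
      simp only [pvAInner, hidx, PySem.List.pyGetD_natCast]
      rw [if_neg (by simpa using (hall k le_rfl (by omega)))]
      omega
    · intro t hkt htm hmin hne
      have ht : t = k := by omega
      subst ht
      simp only [pvAInner, hidx, PySem.List.pyGetD_natCast]
      rw [if_pos (by simpa using hne)]
  | succ d ih =>
    intro k j0 hd hk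
    rw [PySem.List.pyRange_one_cons (by exact_mod_cast hk)]
    have hidx : (a : Int) + (k : Int) = ((a + k : Nat) : Int) := by push_cast; ring
    have hcast : ((k : Int) + 1) = ((k + 1 : Nat) : Int) := by push_cast; ring
    have hk1 : k + 1 < mention.length := by omega
    have ih' := ih (k + 1) (k : Int) (by omega) hk1
    constructor
    · intro hall
      simp only [pvAInner, hidx, PySem.List.pyGetD_natCast]
      rw [if_neg (by simpa using (hall k le_rfl (by omega))), hcast]
      exact ih'.1 (fun t h1 h2 => hall t (by omega) h2)
    · intro t hkt htm hmin hne
      by_cases htk : t = k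
      · subst htk
        simp only [pvAInner, hidx, PySem.List.pyGetD_natCast]
        rw [if_pos (by simpa using hne)]
      · have hkm : mention.getD k "" = document.getD (a + k) "" := hmin k le_rfl (by omega)
        simp only [pvAInner, hidx, PySem.List.pyGetD_natCast]
        rw [if_neg (by simpa using hkm), hcast]
        exact ih'.2 t (by omega) htm (fun s h1 h2 => hmin s (by omega) h2) hne

-- slice equality ⟺ elementwise equality on [0, m)
lemma slice_eq_iff (document mention : List String) (a : Nat)
    (h : a + mention.length ≤ document.length) :
    ((document.drop a).take mention.length = mention) ↔
      ∀ t, t < mention.length → mention.getD t "" = document.getD (a + t) "" := by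
  constructor
  · intro heq t ht
    have h1 : t < ((document.drop a).take mention.length).length := by
      rw [List.length_take, List.length_drop]; omega
    have h3 : a + t < document.length := by omega
    have e1 : ((document.drop a).take mention.length)[t]'h1 = mention[t]'ht :=
      List.getElem_of_eq heq h1
    have e2 : ((document.drop a).take mention.length)[t]'h1 = document[a + t]'h3 := by
      simp [List.getElem_take, List.getElem_drop]
    rw [List.getD_eq_getElem _ _ ht, List.getD_eq_getElem _ _ h3, ← e1, e2]
  · intro hall
    apply List.ext_getElem
    · rw [List.length_take, List.length_drop]; omega
    · intro t h1 h2
      have h3 : a + t < document.length := by omega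
      have := hall t h2
      rw [List.getD_eq_getElem _ _ h2, List.getD_eq_getElem _ _ h3] at this
      simpa [List.getElem_take, List.getElem_drop] using this.symm

-- A's if-condition at start i = a equals B's slice comparison.
lemma condA_iff (document mention : List String) (a : Nat) (hm : mention ≠ [])
    (hle : a + mention.length ≤ document.length) :
    ((PySem.List.pyGetD mention (-1) "" =
        PySem.List.pyGetD document ((a : Int) + (mention.length : Int) - 1) "" ∧
      pvAInner document mention (a : Int)
        (PySem.List.pyRange 0 (mention.length : Int) 1) (-1) + 1 = (mention.length : Int))
      ↔ PySem.List.slice document (some (a : Int)) (some ((a : Int) + (mention.length : Int)))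
          = mention) := by
  have hmpos : 0 < mention.length := List.length_pos_iff.mpr hm
  have hlast : (a : Int) + (mention.length : Int) - 1 = ((a + (mention.length - 1) : Nat) : Int) := by
    push_cast [Nat.cast_sub hmpos]; ring
  have hlastm : PySem.List.pyGetD mention (-1) "" = mention.getD (mention.length - 1) "" := by
    rw [PySem.List.pyGetD_neg_one mention "" hm, List.getLast_eq_getElem,
      List.getD_eq_getElem _ _ (by omega)]
  have hspec := pvAInner_spec document mention a (mention.length - 1) 0 (-1) (by omega) hmpos
  simp only [Nat.cast_zero] at hspec
  rw [PySem.List.slice_natCast_add, slice_eq_iff document mention a hle, hlast, hlastm,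
    PySem.List.pyGetD_natCast]
  constructor
  · rintro ⟨hlasteq, hj⟩
    by_contra hnot
    push_neg at hnot
    obtain ⟨t0, ht0m, ht0ne⟩ := hnot
    have hex : ∃ t, t < mention.length ∧ mention.getD t "" ≠ document.getD (a + t) "" :=
      ⟨t0, ht0m, ht0ne⟩
    classical
    have hfind := Nat.find_spec hex
    set t := Nat.find hex with htdef
    have hmin : ∀ s, s < t → ¬(s < mention.length ∧ mention.getD s "" ≠ document.getD (a + s) "") :=
      fun s hs => Nat.find_min hex hs
    have hr := hspec.2 t (by omega) hfind.1
      (fun s _ hs => by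
        have := hmin s hs
        by_contra hc
        exact this ⟨by omega, hc⟩)
      hfind.2
    rw [hr] at hj
    have ht : t = mention.length - 1 := by omega
    rw [ht] at hfind
    exact hfind.2 (by simpa using hlasteq)
  · intro hall
    refine ⟨by simpa using hall (mention.length - 1) (by omega), ?_⟩
    rw [hspec.1 (fun t _ ht => hall t ht)]
    omega

-- Main list lemma: A's outer recursion over a list of in-range starts equals B's
-- backward fold over the reversed list.
lemma pvAOuter_eq_foldl (document mention : List String) (hm : mention ≠ []) :
    ∀ l : List Int, (∀ i ∈ l, 0 ≤ i ∧ i + (mention.length : Int) ≤ (document.length : Int)) →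
      pvAOuter document mention l =
        (l.reverse).foldl
          (fun res i =>
            if PySem.List.slice document (some i) (some (i + (mention.length : Int))) = mention
            then (true, i) else res)
          (false, -1) := by
  intro l
  induction l with
  | nil => intro _; rfl
  | cons i rest ih =>
    intro hmem
    obtain ⟨hi0, hile⟩ := hmem i (List.mem_cons_self)
    lift i to Nat using hi0 with a
    have hle : a + mention.length ≤ document.length := by exact_mod_cast hile
    have hcond := condA_iff document mention a hm hle
    simp only [pvAOuter, List.reverse_cons, List.foldl_append, List.foldl_cons, List.foldl_nil]
    rw [ih (fun x hx => hmem x (List.mem_cons_of_mem _ hx))]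
    by_cases hc : PySem.List.slice document (some (a : Int))
        (some ((a : Int) + (mention.length : Int))) = mention
    · rw [if_pos (hcond.mpr hc), if_pos hc]
    · rw [if_neg (fun h => hc (hcond.mp h)), if_neg hc]

-- ===== VERDICT (by name: the statement is the Claim_ definition above) =====
theorem findIndiceForMention_spec : Claim_equal_findIndiceForMention := by
  intro document mention _ hpre
  unfold Spec_findIndiceForMention findIndiceForMention findIndiceForMention_alt
  have hrev : PySem.List.pyRange ((document.length : Int) - (mention.length : Int)) (-1) (-1)
      = (PySem.List.pyRange 0 ((document.length : Int) - (mention.length : Int) + 1) 1).reverse := by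
    rw [PySem.List.pyRange_neg_one_eq_reverse]
    norm_num
  simp only [hrev]
  rw [pvAOuter_eq_foldl document mention hpre]
  intro i hi
  rw [PySem.List.mem_pyRange_one] at hi
  omega
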